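-- pv_equiv track=rewrite | github.com/michaelpb/supergrader | supergrader/utils.py | tuple_dict_to_display_matrix
-- ===== SOURCE A (Python) =====
-- def tuple_dict_to_display_matrix(tuple_dict):
--     # Remove duplicates, sort, and split the left and right column labels
--     left_labels = sorted(list(set(left for left, _ in tuple_dict.keys())))
--     right_labels = sorted(list(set(right for _, right in tuple_dict.keys())))
--
--     # Build the matrix "list of lists" format for the tuple_dict
--     matrix = [
--         [tuple_dict.get((left, right)) for left in left_labels]
--         for right in right_labels
--     ]
--     return left_labels, right_labels, matrix
-- ===== SOURCE B (Python) =====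
-- def tuple_dict_to_display_matrix(tuple_dict):
--     # Same label extraction: sorted, de-duplicated left and right labels
--     left_labels = sorted(set(left for left, _ in tuple_dict.keys()))
--     right_labels = sorted(set(right for _, right in tuple_dict.keys()))
--
--     # Index tables, then a single scatter pass over the items into a
--     # None-filled matrix (instead of an L*R grid of dict lookups)
--     col_index = {left: j for j, left in enumerate(left_labels)}
--     row_index = {right: i for i, right in enumerate(right_labels)}
--     matrix = [[None] * len(left_labels) for _ in right_labels]
--     for (left, right), value in tuple_dict.items():
--         matrix[row_index[right]][col_index[left]] = value
--     return left_labels, right_labels, matrix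
-- ===== Notes on version B (the rewrite author's own statement) =====
-- stated objective: alternative
-- what changed: Instead of A's L×R gather (a dict lookup per matrix cell), B builds label-to-index tables and makes a single scatter pass over the dict items into a pre-allocated None-filled matrix.
import Mathlib
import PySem

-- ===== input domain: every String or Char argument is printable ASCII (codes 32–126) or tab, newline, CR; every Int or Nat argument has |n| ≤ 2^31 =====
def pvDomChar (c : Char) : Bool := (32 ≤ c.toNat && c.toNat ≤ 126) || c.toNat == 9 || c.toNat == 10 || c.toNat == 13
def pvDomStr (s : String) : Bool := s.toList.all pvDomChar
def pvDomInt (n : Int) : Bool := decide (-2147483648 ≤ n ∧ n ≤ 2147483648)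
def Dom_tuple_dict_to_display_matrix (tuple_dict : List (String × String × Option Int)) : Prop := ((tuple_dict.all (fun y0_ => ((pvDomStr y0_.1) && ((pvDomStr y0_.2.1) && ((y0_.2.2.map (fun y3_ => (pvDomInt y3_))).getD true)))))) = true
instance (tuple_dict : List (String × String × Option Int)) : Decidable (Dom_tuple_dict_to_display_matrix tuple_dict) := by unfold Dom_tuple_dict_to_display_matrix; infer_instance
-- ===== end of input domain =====

-- B builds an index table per axis and scatters the dict items into a None-filled matrix in one
-- pass, instead of A's L×R grid of dict lookups; same return value (alternative decomposition).

-- ===== PORT A =====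
-- the dict argument, rebuilt as a PySem.Dict keyed by the (left, right) pair (insertion order, overwrite)
def tdd_dict (tuple_dict : List (String × String × Option Int)) : PySem.Dict (String × String) (Option Int) :=
  tuple_dict.foldl (fun d kv => d.insert (kv.1, kv.2.1) kv.2.2) PySem.Dict.empty

def tuple_dict_to_display_matrix (tuple_dict : List (String × String × Option Int)) : List String × List String × List (List (Option Int)) :=
  let d := tdd_dict tuple_dict
  -- sorted(list(set(left for left, _ in tuple_dict.keys())))  (list(set(..)) has arbitrary order; sorted determines the value)
  let left_labels := PySem.List.sorted (PySem.Set.ofList (d.keys.map (fun k => k.1))) (fun x => x) false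
  let right_labels := PySem.List.sorted (PySem.Set.ofList (d.keys.map (fun k => k.2))) (fun x => x) false
  -- matrix = [[tuple_dict.get((left, right)) for left in left_labels] for right in right_labels]
  let matrix := right_labels.map (fun right => left_labels.map (fun left => (d.get? (left, right)).getD none))
  (left_labels, right_labels, matrix)

-- ===== PORT B =====
-- {label: index for index, label in enumerate(labels)}
def tdd_index (labels : List String) : PySem.Dict String Int :=
  (PySem.List.enumerate labels 0).foldl (fun d p => d.insert p.2 p.1) PySem.Dict.empty

def tuple_dict_to_display_matrix_alt (tuple_dict : List (String × String × Option Int)) : List String × List String × List (List (Option Int)) :=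
  let left_labels := PySem.List.sorted (PySem.Set.ofList (tuple_dict.map (fun kv => kv.1))) (fun x => x) false
  let right_labels := PySem.List.sorted (PySem.Set.ofList (tuple_dict.map (fun kv => kv.2.1))) (fun x => x) false
  let col_index := tdd_index left_labels
  let row_index := tdd_index right_labels
  let matrix0 := right_labels.map (fun _ => List.replicate left_labels.length (none : Option Int))
  -- for (left, right), value in tuple_dict.items(): matrix[row_index[right]][col_index[left]] = value
  -- (the stored indices are nonnegative, so .toNat is exact; both indices are always in range)
  let matrix := tuple_dict.foldl
    (fun M kv => M.modify ((row_index.getD kv.2.1 0).toNat)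
      (fun row => row.set ((col_index.getD kv.1 0).toNat) kv.2.2)) matrix0
  (left_labels, right_labels, matrix)

-- ===== PRECONDITION & SPEC =====
def Spec_tuple_dict_to_display_matrix (tuple_dict : List (String × String × Option Int)) (out : List String × List String × List (List (Option Int))) : Prop := out = tuple_dict_to_display_matrix_alt tuple_dict
instance (tuple_dict : List (String × String × Option Int)) (out : List String × List String × List (List (Option Int))) : Decidable (Spec_tuple_dict_to_display_matrix tuple_dict out) := by unfold Spec_tuple_dict_to_display_matrix; infer_instance

-- ===== CLAIM (what is proved, stated in full; the proofs are below) =====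
def Claim_equal_tuple_dict_to_display_matrix : Prop := ∀ (tuple_dict : List (String × String × Option Int)), Dom_tuple_dict_to_display_matrix tuple_dict → Spec_tuple_dict_to_display_matrix tuple_dict (tuple_dict_to_display_matrix tuple_dict)

-- ===== LEMMAS AND PROOFS =====

-- the last binding of key k in the association list (what the rebuilt dict's get returns)
def pvLast (td : List (String × String × Option Int)) (k : String × String) : Option (Option Int) :=
  (td.reverse.find? (fun kv => (kv.1, kv.2.1) == k)).map (fun kv => kv.2.2)

-- cell (i, j) of a matrix, as an Option
def pvCell (M : List (List (Option Int))) (i j : Nat) : Option (Option Int) :=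
  M[i]?.bind (fun row => row[j]?)

-- B's scatter step, with the index-table lookups replaced by List.idxOf
def pvStep (L R : List String) : List (List (Option Int)) → (String × String × Option Int) → List (List (Option Int)) :=
  fun M kv => M.modify (List.idxOf kv.2.1 R) (fun row => row.set (List.idxOf kv.1 L) kv.2.2)

theorem pvLast_cons (t : String × String × Option Int) (ts : List (String × String × Option Int)) (k : String × String) :
    pvLast (t :: ts) k = (pvLast ts k).or (if (t.1, t.2.1) = k then some t.2.2 else none) := by
  by_cases hk : (t.1, t.2.1) = k <;>
    cases h : ts.reverse.find? (fun kv => (kv.1, kv.2.1) == k) <;>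
      simp [pvLast, List.find?_append, hk, h]

theorem pv_build_get? (td : List (String × String × Option Int)) :
    ∀ (d : PySem.Dict (String × String) (Option Int)) (k : String × String),
    (td.foldl (fun d kv => d.insert (kv.1, kv.2.1) kv.2.2) d).get? k = (pvLast td k).or (d.get? k) := by
  induction td with
  | nil => intro d k; simp [pvLast]
  | cons t ts ih =>
    intro d k
    simp only [List.foldl_cons, ih, pvLast_cons, PySem.Dict.get?_insert, Option.or_assoc]
    congr 1
    by_cases hk : k = (t.1, t.2.1) <;> simp [hk, eq_comm]

theorem tdd_dict_get? (td : List (String × String × Option Int)) (k : String × String) :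
    (tdd_dict td).get? k = pvLast td k := by
  simp [tdd_dict, pv_build_get?, PySem.Dict.get?_empty]

theorem pv_idx_skip (ps : List (Int × String)) (x : String) :
    ∀ (d : PySem.Dict String Int), x ∉ ps.map (fun p => p.2) →
    ((ps.foldl (fun d p => d.insert p.2 p.1) d).getD x 0) = d.getD x 0 := by
  induction ps with
  | nil => intro d _; rfl
  | cons p ps ih =>
    intro d h
    simp only [List.map_cons, List.mem_cons, not_or] at h
    simp only [List.foldl_cons, ih _ h.2, PySem.Dict.getD_insert, if_neg h.1]

theorem pv_idx_enum (X : List String) :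
    ∀ (k : Int) (d : PySem.Dict String Int) (x : String), X.Nodup → x ∈ X →
    (((PySem.List.enumerate X k).foldl (fun d p => d.insert p.2 p.1) d).getD x 0) = k + (List.idxOf x X : Int) := by
  induction X with
  | nil => intro _ _ _ _ hx; cases hx
  | cons y ys ih =>
    intro k d x hnd hx
    simp only [PySem.List.enumerate_cons, List.foldl_cons]
    rcases List.mem_cons.mp hx with rfl | hmem
    · have hnot : x ∉ (PySem.List.enumerate ys (k + 1)).map (fun p => p.2) := by
        rw [PySem.List.map_snd_enumerate]; exact (List.nodup_cons.mp hnd).1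
      rw [pv_idx_skip _ _ _ hnot, PySem.Dict.getD_insert, if_pos rfl, List.idxOf_cons_self]
      simp
    · have hne : y ≠ x := by rintro rfl; exact (List.nodup_cons.mp hnd).1 hmem
      rw [ih (k + 1) _ x (List.nodup_cons.mp hnd).2 hmem, List.idxOf_cons, Bool.cond_eq_ite]
      rw [if_neg (by simpa using hne)]
      push_cast; ring

theorem tdd_index_getD (X : List String) (hnd : X.Nodup) (x : String) (hx : x ∈ X) :
    (tdd_index X).getD x 0 = (List.idxOf x X : Int) := by
  simpa using pv_idx_enum X 0 PySem.Dict.empty x hnd hx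

theorem pv_mem_modify {α : Type} (l : List α) (i : Nat) (f : α → α) (x : α)
    (hx : x ∈ l.modify i f) : x ∈ l ∨ ∃ y ∈ l, x = f y := by
  rcases List.mem_iff_getElem.mp hx with ⟨n, hn, rfl⟩
  have hn' : n < l.length := by rw [← List.length_modify f l i]; exact hn
  rw [List.getElem_modify]
  split_ifs
  · exact Or.inr ⟨l[n], List.getElem_mem hn', rfl⟩
  · exact Or.inl (List.getElem_mem hn')

theorem pvScatter_shape (L R : List String) (td : List (String × String × Option Int)) :
    ∀ M : List (List (Option Int)), (∀ row ∈ M, row.length = L.length) →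
      (td.foldl (pvStep L R) M).length = M.length ∧
      (∀ row ∈ td.foldl (pvStep L R) M, row.length = L.length) := by
  induction td with
  | nil => intro M h; exact ⟨rfl, h⟩
  | cons t ts ih =>
    intro M h
    have hrows : ∀ row ∈ pvStep L R M t, row.length = L.length := by
      intro row hrow
      rcases pv_mem_modify _ _ _ _ hrow with hmem | ⟨y, hy, rfl⟩
      · exact h row hmem
      · simpa using h y hy
    obtain ⟨h1, h2⟩ := ih (pvStep L R M t) hrows
    simp only [List.foldl_cons]
    exact ⟨h1.trans (by simp [pvStep]), h2⟩

theorem pvScatter_cell (L R : List String) (hndL : L.Nodup) (hndR : R.Nodup)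
    (td : List (String × String × Option Int)) :
    ∀ M : List (List (Option Int)), (∀ kv ∈ td, kv.1 ∈ L ∧ kv.2.1 ∈ R) →
      M.length = R.length → (∀ row ∈ M, row.length = L.length) →
      ∀ i j (hi : i < R.length) (hj : j < L.length),
      pvCell (td.foldl (pvStep L R) M) i j = (pvLast td (L[j]'hj, R[i]'hi)).or (pvCell M i j) := by
  induction td with
  | nil => intro M _ _ _ i j hi hj; simp [pvLast, pvCell]
  | cons t ts ih =>
    intro M hkv hM hrows i j hi hj
    have hmem := hkv t (List.mem_cons_self)
    have hit : List.idxOf t.2.1 R < R.length := List.idxOf_lt_length_of_mem hmem.2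
    have hjt : List.idxOf t.1 L < L.length := List.idxOf_lt_length_of_mem hmem.1
    have hrows' : ∀ row ∈ pvStep L R M t, row.length = L.length := by
      intro row hrow
      rcases pv_mem_modify _ _ _ _ hrow with hmem2 | ⟨y, hy, rfl⟩
      · exact hrows row hmem2
      · simpa using hrows y hy
    have hM' : (pvStep L R M t).length = R.length := by rw [← hM]; simp [pvStep]
    rw [List.foldl_cons,
      ih (pvStep L R M t) (fun kv hkv' => hkv kv (List.mem_cons_of_mem _ hkv')) hM' hrows' i j hi hj,
      pvLast_cons, Option.or_assoc]
    congr 1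
    have hiM : i < M.length := by omega
    have hrowlen : M[i].length = L.length := hrows _ (List.getElem_mem hiM)
    have hcell' : pvCell (pvStep L R M t) i j =
        if List.idxOf t.2.1 R = i ∧ List.idxOf t.1 L = j then some t.2.2 else pvCell M i j := by
      simp only [pvCell, pvStep, List.getElem?_modify, List.getElem?_eq_getElem hiM,
        Option.bind_some]
      by_cases h1 : List.idxOf t.2.1 R = i
      · simp only [h1]
        by_cases h2 : List.idxOf t.1 L = j
        · subst h2; simp [hrowlen, hjt]
        · simp [h2, List.getElem?_eq_getElem (by omega : j < M[i].length)]
      · simp [h1]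
    rw [hcell']
    by_cases h1 : List.idxOf t.2.1 R = i
    · by_cases h2 : List.idxOf t.1 L = j
      · have hK : (t.1, t.2.1) = (L[j]'hj, R[i]'hi) := by
          subst h1 h2
          rw [List.getElem_idxOf hjt, List.getElem_idxOf hit]
        rw [if_pos ⟨h1, h2⟩, if_pos hK, Option.some_or]
      · have hK : ¬ (t.1, t.2.1) = (L[j]'hj, R[i]'hi) := by
          intro heq
          rw [Prod.mk.injEq] at heq
          exact h2 (by rw [heq.1, List.Nodup.idxOf_getElem hndL j hj])
        rw [if_neg (fun hand => h2 hand.2), if_neg hK, Option.none_or]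
    · have hK : ¬ (t.1, t.2.1) = (L[j]'hj, R[i]'hi) := by
        intro heq
        rw [Prod.mk.injEq] at heq
        exact h1 (by rw [heq.2, List.Nodup.idxOf_getElem hndR i hi])
      rw [if_neg (fun hand => h1 hand.1), if_neg hK, Option.none_or]

-- sorted(set(xs)) only depends on the membership of xs
theorem pv_sorted_set_eq (xs ys : List String) (h : ∀ a, a ∈ xs ↔ a ∈ ys) :
    PySem.List.sorted (PySem.Set.ofList xs) (fun x => x) false
      = PySem.List.sorted (PySem.Set.ofList ys) (fun x => x) false := by
  apply PySem.List.sorted_eq_of_perm_of_pairwise_lt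
  · refine (PySem.List.sorted_perm _ _ _).trans ?_
    rw [List.perm_ext_iff_of_nodup (PySem.Set.nodup_ofList _) (PySem.Set.nodup_ofList _)]
    intro a
    rw [PySem.Set.mem_ofList, PySem.Set.mem_ofList, h]
  · exact PySem.List.sorted_ofList_pairwise_lt ys

theorem pv_mem_keys (td : List (String × String × Option Int)) (k : String × String) :
    k ∈ (tdd_dict td).keys ↔ k ∈ td.map (fun kv => (kv.1, kv.2.1)) := by
  unfold tdd_dict
  rw [PySem.Dict.keys_foldl_insert_key td (fun kv => (kv.1, kv.2.1))
    (fun _ kv => kv.2.2) PySem.Dict.empty]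
  rw [PySem.Set.mem_update]
  simp [PySem.Dict.keys_empty]

theorem pv_main (td : List (String × String × Option Int)) :
    tuple_dict_to_display_matrix td = tuple_dict_to_display_matrix_alt td := by
  have hmemL : ∀ a, a ∈ (tdd_dict td).keys.map (fun k => k.1) ↔ a ∈ td.map (fun kv => kv.1) := by
    intro a
    simp only [List.mem_map]
    constructor
    · rintro ⟨k, hk, rfl⟩
      obtain ⟨kv, hkv, rfl⟩ := List.mem_map.mp ((pv_mem_keys td k).1 hk)
      exact ⟨kv, hkv, rfl⟩
    · rintro ⟨kv, hkv, rfl⟩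
      exact ⟨(kv.1, kv.2.1), (pv_mem_keys td _).2 (List.mem_map_of_mem hkv), rfl⟩
  have hmemR : ∀ a, a ∈ (tdd_dict td).keys.map (fun k => k.2) ↔ a ∈ td.map (fun kv => kv.2.1) := by
    intro a
    simp only [List.mem_map]
    constructor
    · rintro ⟨k, hk, rfl⟩
      obtain ⟨kv, hkv, rfl⟩ := List.mem_map.mp ((pv_mem_keys td k).1 hk)
      exact ⟨kv, hkv, rfl⟩
    · rintro ⟨kv, hkv, rfl⟩
      exact ⟨(kv.1, kv.2.1), (pv_mem_keys td _).2 (List.mem_map_of_mem hkv), rfl⟩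
  have hLeft := pv_sorted_set_eq ((tdd_dict td).keys.map (fun k => k.1)) (td.map (fun kv => kv.1)) hmemL
  have hRight := pv_sorted_set_eq ((tdd_dict td).keys.map (fun k => k.2)) (td.map (fun kv => kv.2.1)) hmemR
  -- abbreviations for B's label lists
  generalize hLdef : PySem.List.sorted (PySem.Set.ofList (td.map (fun kv => kv.1))) (fun x => x) false = L at hLeft
  generalize hRdef : PySem.List.sorted (PySem.Set.ofList (td.map (fun kv => kv.2.1))) (fun x => x) false = R at hRight
  have hndL : L.Nodup := by
    rw [← hLdef]
    exact ((PySem.List.sorted_perm _ _ _).nodup_iff).mpr (PySem.Set.nodup_ofList _)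
  have hndR : R.Nodup := by
    rw [← hRdef]
    exact ((PySem.List.sorted_perm _ _ _).nodup_iff).mpr (PySem.Set.nodup_ofList _)
  have hmemLR : ∀ kv ∈ td, kv.1 ∈ L ∧ kv.2.1 ∈ R := by
    intro kv hkv
    constructor
    · rw [← hLdef, PySem.List.mem_sorted, PySem.Set.mem_ofList]
      exact List.mem_map_of_mem hkv
    · rw [← hRdef, PySem.List.mem_sorted, PySem.Set.mem_ofList]
      exact List.mem_map_of_mem hkv
  simp only [tuple_dict_to_display_matrix, tuple_dict_to_display_matrix_alt, hLdef, hRdef,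
    hLeft, hRight, Prod.mk.injEq, true_and]
  -- the two matrices agree
  have hfold : td.foldl
      (fun M kv => M.modify ((PySem.Dict.getD (tdd_index R) kv.2.1 0).toNat)
        (fun row => row.set ((PySem.Dict.getD (tdd_index L) kv.1 0).toNat) kv.2.2))
      (R.map (fun _ => List.replicate L.length (none : Option Int)))
      = td.foldl (pvStep L R) (R.map (fun _ => List.replicate L.length (none : Option Int))) := by
    apply PySem.List.foldl_congr_mem
    intro acc kv hkv
    rw [tdd_index_getD R hndR _ (hmemLR kv hkv).2, tdd_index_getD L hndL _ (hmemLR kv hkv).1]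
    simp [pvStep]
  rw [hfold]
  have hM0rows : ∀ row ∈ R.map (fun _ => List.replicate L.length (none : Option Int)),
      row.length = L.length := by
    intro row hrow
    obtain ⟨_, _, rfl⟩ := List.mem_map.mp hrow
    exact List.length_replicate
  have hM0len : (R.map (fun _ => List.replicate L.length (none : Option Int))).length = R.length :=
    List.length_map ..
  obtain ⟨hslen, hsrows⟩ := pvScatter_shape L R td _ hM0rows
  apply (List.ext_getElem? ?_).symm
  intro i
  by_cases hi : i < R.length
  · have hi' : i < (td.foldl (pvStep L R) (R.map (fun _ => List.replicate L.length (none : Option Int)))).length := by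
      rw [hslen, hM0len]; exact hi
    rw [List.getElem?_map, List.getElem?_eq_getElem hi, List.getElem?_eq_getElem hi',
      Option.map_some]
    congr 1
    apply List.ext_getElem?
    intro j
    by_cases hj : j < L.length
    · have hc := pvScatter_cell L R hndL hndR td _ hmemLR hM0len hM0rows i j hi hj
      have hcl : pvCell (td.foldl (pvStep L R) (R.map (fun _ => List.replicate L.length (none : Option Int)))) i j
          = (td.foldl (pvStep L R) (R.map (fun _ => List.replicate L.length (none : Option Int))))[i][j]? := by
        unfold pvCell
        rw [List.getElem?_eq_getElem hi', Option.bind_some]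
      have hM0cell : pvCell (R.map (fun _ => List.replicate L.length (none : Option Int))) i j = some none := by
        unfold pvCell
        rw [List.getElem?_map, List.getElem?_eq_getElem hi, Option.map_some, Option.bind_some,
          List.getElem?_replicate, if_pos hj]
      rw [hcl, hM0cell] at hc
      rw [List.getElem?_map, List.getElem?_eq_getElem hj, Option.map_some, hc, tdd_dict_get?]
      cases hpl : pvLast td (L[j], R[i]) <;> simp
    · rw [List.getElem?_eq_none (by simpa using not_lt.mp hj : (L.map _).length ≤ j),
        List.getElem?_eq_none]
      rw [hsrows _ (List.getElem_mem hi')]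
      exact not_lt.mp hj
  · rw [List.getElem?_eq_none (by simpa using not_lt.mp hi : (R.map _).length ≤ i),
      List.getElem?_eq_none]
    rw [hslen, hM0len]
    exact not_lt.mp hi

-- ===== VERDICT (by name: the statement is the Claim_ definition above) =====
theorem tuple_dict_to_display_matrix_spec : Claim_equal_tuple_dict_to_display_matrix := by
  intro td _
  unfold Spec_tuple_dict_to_display_matrix
  exact pv_main td
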